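-- pv_equiv track=rewrite | github.com/its-PKN-2k4/wordpress-ultralite | src/block_markdown_handlers.py | check_heading_type
-- ===== SOURCE A (Python) =====
-- def check_heading_type(block):
--     if len(block) == 0:
--         return False
--     lines = block.splitlines()
--     for line in lines:
--         if not line.startswith(("# ", "## ", "### ", "#### ", "##### ", "###### "), 0):
--             return False
--     return True
-- ===== SOURCE B (Python) =====
-- def check_heading_type(block):
--     if block == "":
--         return False
--     for line in block.splitlines():
--         n = 0
--         while n < len(line) and line[n] == '#':
--             n += 1
--         if not (1 <= n <= 6 and n < len(line) and line[n] == ' '):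
--             return False
--     return True
-- ===== Notes on version B (the rewrite author's own statement) =====
-- stated objective: alternative
-- what changed: Replaces the tuple-of-six-prefixes startswith test per line with an explicit scan that counts the leading hash characters and then checks the count is between 1 and 6 and a space follows.
import Mathlib
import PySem

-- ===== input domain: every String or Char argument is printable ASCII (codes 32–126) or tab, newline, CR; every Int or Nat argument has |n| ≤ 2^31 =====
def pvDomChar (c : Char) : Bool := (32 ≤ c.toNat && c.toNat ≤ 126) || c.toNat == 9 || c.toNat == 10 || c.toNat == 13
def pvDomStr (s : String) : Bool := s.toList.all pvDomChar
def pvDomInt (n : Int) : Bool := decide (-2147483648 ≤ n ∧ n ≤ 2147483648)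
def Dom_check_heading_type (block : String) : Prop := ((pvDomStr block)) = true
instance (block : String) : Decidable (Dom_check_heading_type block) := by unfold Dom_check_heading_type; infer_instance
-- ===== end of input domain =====

-- B replaces the six-prefix startswith test per line with an explicit leading-'#' count; alternative decomposition, same cost.

-- ===== PORT A =====
-- the tuple-startswith test of one line, prefixes in Python's order
def pvLineA (line : String) : Bool :=
  PySem.Str.startswith line "# " || PySem.Str.startswith line "## " ||
  PySem.Str.startswith line "### " || PySem.Str.startswith line "#### " ||
  PySem.Str.startswith line "##### " || PySem.Str.startswith line "###### "

-- the for-loop with early `return False`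
def pvLoopA : List String → Bool
  | [] => true
  | l :: ls => if ¬ pvLineA l then false else pvLoopA ls

def check_heading_type (block : String) : Bool :=
  if PySem.Str.len block = 0 then false
  else pvLoopA (PySem.Str.splitlines block)

-- ===== PORT B =====
-- the while-loop counting leading '#'
def pvCountHash : List Char → Nat
  | [] => 0
  | c :: t => if c = '#' then pvCountHash t + 1 else 0

def pvLineB (line : String) : Bool :=
  let cs := line.toList
  let n := pvCountHash cs
  decide (1 ≤ n) && decide (n ≤ 6) && decide (n < cs.length) && (cs[n]? == some ' ')

def pvLoopB : List String → Bool
  | [] => true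
  | l :: ls => if ¬ pvLineB l then false else pvLoopB ls

def check_heading_type_alt (block : String) : Bool :=
  if block = "" then false
  else pvLoopB (PySem.Str.splitlines block)

-- ===== PRECONDITION & SPEC =====
def Spec_check_heading_type (block : String) (out : Bool) : Prop := out = check_heading_type_alt block
instance (block : String) (out : Bool) : Decidable (Spec_check_heading_type block out) := by unfold Spec_check_heading_type; infer_instance

-- ===== CLAIM (what is proved, stated in full; the proofs are below) =====
def Claim_equal_check_heading_type : Prop := ∀ (block : String), Dom_check_heading_type block → Spec_check_heading_type block (check_heading_type block)

-- ===== LEMMAS AND PROOFS =====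

-- hashes-then-space prefix characterised by the leading-hash count
lemma prefix_hashes_space (k : Nat) (cs : List Char) :
    (List.replicate k '#' ++ [' ']) <+: cs ↔ (pvCountHash cs = k ∧ cs[k]? = some ' ') := by
  induction k generalizing cs with
  | zero =>
    cases cs with
    | nil => simp [pvCountHash]
    | cons c t =>
      simp only [List.replicate, List.nil_append, List.cons_prefix_cons, List.getElem?_cons_zero]
      constructor
      · rintro ⟨rfl, -⟩
        refine ⟨?_, rfl⟩
        simp [pvCountHash]
      · rintro ⟨hc, hs⟩
        exact ⟨Option.some_inj.mp hs.symm, List.nil_prefix⟩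
  | succ k ih =>
    cases cs with
    | nil => simp [pvCountHash, List.replicate]
    | cons c t =>
      simp only [List.replicate_succ, List.cons_append, List.cons_prefix_cons,
        List.getElem?_cons_succ]
      constructor
      · rintro ⟨rfl, hp⟩
        rcases (ih t).mp hp with ⟨hn, hs⟩
        exact ⟨by simp [pvCountHash, hn], hs⟩
      · rintro ⟨hc, hs⟩
        by_cases h : c = '#'
        · subst h
          have hn : pvCountHash t = k := by simpa [pvCountHash] using hc
          exact ⟨rfl, (ih t).mpr ⟨hn, hs⟩⟩
        · exfalso
          simp [pvCountHash, h] at hc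

lemma getElem?_some_lt {cs : List Char} {k : Nat} {c : Char} (h : cs[k]? = some c) :
    k < cs.length := by
  exact (List.getElem?_eq_some_iff.mp h).1

-- the two per-line tests agree
lemma line_eq (l : String) : pvLineA l = pvLineB l := by
  have e1 : "# ".toList = List.replicate 1 '#' ++ [' '] := by rfl
  have e2 : "## ".toList = List.replicate 2 '#' ++ [' '] := by rfl
  have e3 : "### ".toList = List.replicate 3 '#' ++ [' '] := by rfl
  have e4 : "#### ".toList = List.replicate 4 '#' ++ [' '] := by rfl
  have e5 : "##### ".toList = List.replicate 5 '#' ++ [' '] := by rfl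
  have e6 : "###### ".toList = List.replicate 6 '#' ++ [' '] := by rfl
  rw [Bool.eq_iff_iff]
  simp only [pvLineA, pvLineB, Bool.or_eq_true, PySem.Str.startswith_eq,
    PySem.Chars.startswith_iff, e1, e2, e3, e4, e5, e6, prefix_hashes_space,
    Bool.and_eq_true, decide_eq_true_iff, beq_iff_eq]
  constructor
  · rintro (((((⟨h, hs⟩ | ⟨h, hs⟩) | ⟨h, hs⟩) | ⟨h, hs⟩) | ⟨h, hs⟩) | ⟨h, hs⟩) <;>
      exact ⟨⟨⟨by omega, by omega⟩, by rw [h]; exact getElem?_some_lt hs⟩, by rw [h]; exact hs⟩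
  · rintro ⟨⟨⟨h1, h6⟩, -⟩, hs⟩
    have : pvCountHash l.toList = 1 ∨ pvCountHash l.toList = 2 ∨ pvCountHash l.toList = 3 ∨
        pvCountHash l.toList = 4 ∨ pvCountHash l.toList = 5 ∨ pvCountHash l.toList = 6 := by omega
    rcases this with h | h | h | h | h | h <;> rw [h] at hs <;> simp [h, hs]

lemma loop_eq (ls : List String) : pvLoopA ls = pvLoopB ls := by
  induction ls with
  | nil => rfl
  | cons l t ih => simp [pvLoopA, pvLoopB, line_eq, ih]

-- ===== VERDICT (by name: the statement is the Claim_ definition above) =====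
theorem check_heading_type_spec : Claim_equal_check_heading_type := by
  intro block _
  unfold Spec_check_heading_type check_heading_type check_heading_type_alt
  by_cases hb : block = ""
  · subst hb; rfl
  · have hlen : ¬ (PySem.Str.len block = 0) := by
      simp [PySem.Str.len_eq, hb]
    simp [hb, loop_eq]
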